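-- pv_equiv track=rewrite | github.com/vaishu567/dsapracrepo | Python/recursion.py | replaceab
-- ===== SOURCE A (Python) =====
-- def replaceab(s,n,i,sam):
--     if i==n:
--         return sam
--     if s[i]=='p' and s[i+1]=="i":
--         sam+='b'
--         # continue
--         # pass
--     else:
--         sam+=s[i]
--     sam=replaceab(s,n,i+1,sam)
--     return sam
-- ===== SOURCE B (Python) =====
-- def replaceab(s, n, i, sam):
--     return sam + ''.join(
--         'b' if s[j] == 'p' and s[j + 1] == 'i' else s[j]
--         for j in range(i, n)
--     )
-- ===== Notes on version B (the rewrite author's own statement) =====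
-- stated objective: idiomatic
-- what changed: Replaces the O(n^2) tail recursion that rebuilds the accumulator string at every step with a single generator over range(i, n) joined once onto sam.
import Mathlib
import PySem

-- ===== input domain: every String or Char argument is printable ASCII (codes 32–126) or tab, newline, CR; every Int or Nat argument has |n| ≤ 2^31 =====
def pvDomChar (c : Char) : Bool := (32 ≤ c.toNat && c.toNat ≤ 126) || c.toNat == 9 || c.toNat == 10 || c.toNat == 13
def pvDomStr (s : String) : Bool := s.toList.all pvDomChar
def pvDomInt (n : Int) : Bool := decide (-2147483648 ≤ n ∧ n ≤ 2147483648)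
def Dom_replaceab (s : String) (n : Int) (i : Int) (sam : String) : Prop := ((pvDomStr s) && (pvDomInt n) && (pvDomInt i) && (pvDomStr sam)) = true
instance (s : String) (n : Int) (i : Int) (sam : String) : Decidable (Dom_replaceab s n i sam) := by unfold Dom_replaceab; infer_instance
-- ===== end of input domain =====

-- B replaces A's O(n^2) tail recursion (accumulator string rebuilt each step) with
-- one pass: a per-index map over range(i, n) joined once onto sam (idiomatic).

-- ===== PORT A =====
-- Fuel (n - i).toNat bounds the recursion; under Pre_ the `i = n` test fires exactly
-- when the fuel runs out, so the fuel never cuts a returning run short.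
-- Where Python raises IndexError (pyGet? = none) the port returns a dummy; such
-- inputs are outside Pre_.
def replaceabGo (s : List Char) (n : Int) (i : Int) (sam : List Char) : Nat → List Char
  | 0 => sam
  | fuel + 1 =>
    if i = n then sam
    else
      let sam' :=
        if PySem.List.pyGet? s i = some 'p' ∧ PySem.List.pyGet? s (i + 1) = some 'i'
        then sam ++ ['b']
        else sam ++ [(PySem.List.pyGet? s i).getD ' ']
      replaceabGo s n (i + 1) sam' fuel

def replaceab (s : String) (n : Int) (i : Int) (sam : String) : String :=
  if i = n then sam
  else String.mk (replaceabGo s.toList n i sam.toList ((n - i).toNat + 1))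

-- ===== PORT B =====
def replaceab_alt (s : String) (n : Int) (i : Int) (sam : String) : String :=
  String.mk (sam.toList ++ (PySem.List.pyRange i n 1).map (fun j =>
    match PySem.List.pyGet? s.toList j with
    | none => ' '  -- IndexError in Python; outside Pre_
    | some c => if c = 'p' ∧ PySem.List.pyGet? s.toList (j + 1) = some 'i' then 'b' else c))

-- ===== PRECONDITION & SPEC =====
-- Pre_ excludes exactly the inputs on which A does not return: i > n (infinite
-- recursion) and any step j in [i, n) whose index access s[j] — or s[j+1] after
-- seeing 'p' — raises IndexError.
def Pre_replaceab (s : String) (n : Int) (i : Int) (sam : String) : Prop :=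
  i ≤ n ∧ (i = n ∨
    (-(s.toList.length : Int) ≤ i ∧ n ≤ (s.toList.length : Int) ∧
      ∀ j ∈ PySem.List.pyRange i n 1,
        PySem.List.pyGet? s.toList j = some 'p' → (PySem.List.pyGet? s.toList (j + 1)).isSome = true))
instance (s : String) (n : Int) (i : Int) (sam : String) : Decidable (Pre_replaceab s n i sam) := by
  unfold Pre_replaceab; infer_instance

def pvWitness_replaceab : String × Int × Int × String := ("pipa", 4, 0, "x")

def Spec_replaceab (s : String) (n : Int) (i : Int) (sam : String) (out : String) : Prop := out = replaceab_alt s n i sam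
instance (s : String) (n : Int) (i : Int) (sam : String) (out : String) : Decidable (Spec_replaceab s n i sam out) := by unfold Spec_replaceab; infer_instance

-- ===== CLAIM (what is proved, stated in full; the proofs are below) =====
def Claim_equal_replaceab : Prop := ∀ (s : String) (n : Int) (i : Int) (sam : String), Dom_replaceab s n i sam → Pre_replaceab s n i sam → Spec_replaceab s n i sam (replaceab s n i sam)

-- ===== LEMMAS AND PROOFS =====

-- the per-index character B produces
def replaceabPiece (s : List Char) (j : Int) : Char :=
  match PySem.List.pyGet? s j with
  | none => ' '
  | some c => if c = 'p' ∧ PySem.List.pyGet? s (j + 1) = some 'i' then 'b' else c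

theorem replaceabGo_eq (s : List Char) (n : Int) :
    ∀ (fuel : Nat) (i : Int) (sam : List Char), (n - i).toNat ≤ fuel → i ≤ n →
    (∀ j ∈ PySem.List.pyRange i n 1,
      (PySem.List.pyGet? s j).isSome = true ∧
      (PySem.List.pyGet? s j = some 'p' → (PySem.List.pyGet? s (j + 1)).isSome = true)) →
    replaceabGo s n i sam fuel = sam ++ (PySem.List.pyRange i n 1).map (replaceabPiece s) := by
  intro fuel
  induction fuel with
  | zero =>
    intro i sam hf hle _
    have hin : i = n := by omega
    simp [replaceabGo, hin, PySem.List.pyRange_one_eq_nil (le_refl n)]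
  | succ f ih =>
    intro i sam hf hle hgood
    by_cases hin : i = n
    · simp [replaceabGo, hin, PySem.List.pyRange_one_eq_nil (le_refl n)]
    · have hlt : i < n := lt_of_le_of_ne hle hin
      have hcons := PySem.List.pyRange_one_cons hlt
      have hgi := hgood i (by rw [hcons]; exact List.mem_cons_self ..)
      have hrest : ∀ j ∈ PySem.List.pyRange (i + 1) n 1,
          (PySem.List.pyGet? s j).isSome = true ∧
          (PySem.List.pyGet? s j = some 'p' → (PySem.List.pyGet? s (j + 1)).isSome = true) := by
        intro j hj
        exact hgood j (by rw [hcons]; exact List.mem_cons_of_mem _ hj)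
      have hstep : (if PySem.List.pyGet? s i = some 'p' ∧ PySem.List.pyGet? s (i + 1) = some 'i'
            then sam ++ ['b']
            else sam ++ [(PySem.List.pyGet? s i).getD ' ']) = sam ++ [replaceabPiece s i] := by
        obtain ⟨hsome, hp⟩ := hgi
        rcases ho : PySem.List.pyGet? s i with _ | c
        · rw [ho] at hsome; simp at hsome
        · unfold replaceabPiece
          rw [ho]
          by_cases hc : c = 'p'
          · subst hc
            rcases h1 : PySem.List.pyGet? s (i + 1) with _ | c2
            · have := hp ho; rw [h1] at this; simp at this
            · by_cases hc2 : c2 = 'i'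
              · subst hc2; simp
              · simp [hc2]
          · simp [hc]
      rw [show replaceabGo s n i sam (f + 1) =
            (if i = n then sam else
              replaceabGo s n (i + 1)
                (if PySem.List.pyGet? s i = some 'p' ∧ PySem.List.pyGet? s (i + 1) = some 'i'
                 then sam ++ ['b']
                 else sam ++ [(PySem.List.pyGet? s i).getD ' ']) f) from rfl]
      rw [if_neg hin, hstep, ih (i + 1) (sam ++ [replaceabPiece s i]) (by omega) (by omega) hrest,
          hcons]
      simp

theorem pyGet?_isSome_of_inRange (xs : List Char) (j : Int)
    (h1 : -(xs.length : Int) ≤ j) (h2 : j < (xs.length : Int)) :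
    (PySem.List.pyGet? xs j).isSome = true := by
  rcases h : PySem.List.pyGet? xs j with _ | c
  · rw [PySem.List.pyGet?_eq_none_iff, PySem.Raise.InRange] at h
    omega
  · rfl

-- ===== VERDICT (by name: the statement is the Claim_ definition above) =====
theorem replaceab_spec : Claim_equal_replaceab := by
  intro s n i sam _ hpre
  obtain ⟨hle, hcase⟩ := hpre
  have hgood : ∀ j ∈ PySem.List.pyRange i n 1,
      (PySem.List.pyGet? s.toList j).isSome = true ∧
      (PySem.List.pyGet? s.toList j = some 'p' → (PySem.List.pyGet? s.toList (j + 1)).isSome = true) := by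
    intro j hj
    rw [PySem.List.mem_pyRange_one] at hj
    rcases hcase with hin | ⟨hlo, hhi, hp⟩
    · omega
    · exact ⟨pyGet?_isSome_of_inRange s.toList j (by omega) (by omega),
        hp j (by rw [PySem.List.mem_pyRange_one]; omega)⟩
  unfold Spec_replaceab replaceab replaceab_alt
  by_cases hin : i = n
  · rw [if_pos hin]
    subst hin
    simp [PySem.List.pyRange_one_eq_nil (le_refl i), String.mk]
  · rw [if_neg hin,
        replaceabGo_eq s.toList n ((n - i).toNat + 1) i sam.toList (by omega) hle hgood]
    rfl
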